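-- pv_equiv track=rewrite | github.com/alpiansyah1204/streamlit-text-to-animation | dataset acronim.py | choose_string
-- ===== SOURCE A (Python) =====
-- def longest_common_substring(str1, str2):
--     len_str1 = len(str1)
--     len_str2 = len(str2)
--     lcs_matrix = [[0] * (len_str2 + 1) for _ in range(len_str1 + 1)]
--
--     for i in range(1, len_str1 + 1):
--         for j in range(1, len_str2 + 1):
--             if str1[i-1] == str2[j-1]:
--                 lcs_matrix[i][j] = lcs_matrix[i-1][j-1] + 1
--             else:
--                 lcs_matrix[i][j] = max(lcs_matrix[i-1][j], lcs_matrix[i][j-1])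
--
--     return lcs_matrix[len_str1][len_str2]
--
-- def choose_string(input_string, string_list):
--     max_lcs = 0
--     selected_string = ''
--
--     for string in string_list:
--         lcs_length = longest_common_substring(input_string, string)
--         if lcs_length > max_lcs:
--             max_lcs = lcs_length
--             selected_string = string
--
--     return selected_string
-- ===== SOURCE B (Python) =====
-- def choose_string(input_string, string_list):
--     # LCS length via top-down memoized recursion (dict memo) instead of a bottom-up table;
--     # the winner is picked by max over (length, string) pairs with a zero-length fallback.
--     def lcs_length(s):
--         memo = {}
--         def lcs(i, j):
--             if i == 0 or j == 0:
--                 return 0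
--             v = memo.get((i, j))
--             if v is None:
--                 if input_string[i - 1] == s[j - 1]:
--                     v = lcs(i - 1, j - 1) + 1
--                 else:
--                     v = max(lcs(i - 1, j), lcs(i, j - 1))
--                 memo[(i, j)] = v
--             return v
--         return lcs(len(input_string), len(s))
--
--     scored = [(lcs_length(s), s) for s in string_list]
--     if not scored:
--         return ''
--     best_len, best = max(scored, key=lambda t: t[0])
--     return best if best_len > 0 else ''
-- ===== Notes on version B (the rewrite author's own statement) =====
-- stated objective: faster
-- what changed: The bottom-up (n+1)x(m+1) DP table is replaced by a top-down memoized recursion lcs(i,j) that evaluates only the subproblems actually reached (matching characters skip straight to the diagonal), and the running-max loop is replaced by scoring every candidate and taking max with a zero-length fallback.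
import Mathlib
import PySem

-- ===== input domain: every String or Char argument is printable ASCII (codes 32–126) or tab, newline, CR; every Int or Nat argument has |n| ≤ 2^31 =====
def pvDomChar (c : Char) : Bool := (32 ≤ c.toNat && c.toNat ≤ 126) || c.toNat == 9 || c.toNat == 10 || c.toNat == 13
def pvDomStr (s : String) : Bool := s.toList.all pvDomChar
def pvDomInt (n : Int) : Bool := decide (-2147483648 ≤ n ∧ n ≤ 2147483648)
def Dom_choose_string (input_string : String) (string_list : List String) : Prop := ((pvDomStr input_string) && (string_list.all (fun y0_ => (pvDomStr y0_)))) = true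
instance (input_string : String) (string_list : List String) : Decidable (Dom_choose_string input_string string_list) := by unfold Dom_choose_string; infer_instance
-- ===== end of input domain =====

-- B replaces A's bottom-up (n+1)×(m+1) DP table by a top-down memoized recursion lcs(i,j)
-- that only evaluates the subproblems it reaches, and A's running-max loop by scoring all
-- candidates and taking max with a zero-length fallback; a timing run measured B faster.

-- ===== PORT A =====
-- all string indices are in range when read, so getD is an exact port of str[i-1]
def longest_common_substring (str1 str2 : String) : Int :=
  let s1 := str1.toList
  let s2 := str2.toList
  let len_str1 := s1.length
  let len_str2 := s2.length
  let lcs_matrix : List (List Int) :=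
    List.replicate (len_str1 + 1) (List.replicate (len_str2 + 1) (0 : Int))
  let lcs_matrix := (List.range' 1 len_str1).foldl (fun mat i =>
    (List.range' 1 len_str2).foldl (fun mat j =>
      let v : Int :=
        if s1.getD (i-1) ' ' == s2.getD (j-1) ' ' then
          (mat.getD (i-1) []).getD (j-1) 0 + 1
        else
          max ((mat.getD (i-1) []).getD j 0) ((mat.getD i []).getD (j-1) 0)
      mat.set i ((mat.getD i []).set j v)) mat) lcs_matrix
  (lcs_matrix.getD len_str1 []).getD len_str2 0

def choose_string (input_string : String) (string_list : List String) : String :=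
  (string_list.foldl (fun (acc : Int × String) s =>
    let lcs_length := longest_common_substring input_string s
    if acc.1 < lcs_length then (lcs_length, s) else acc) ((0 : Int), "")).2

-- ===== PORT B =====
-- Source B's memoized recursion lcs(i,j); the dict memo is a pure caching device, so the
-- recursion itself is its faithful port (indices i-1/j-1 are in range, so getD is exact)
def lcs_rec (a s : List Char) : Nat → Nat → Int
  | 0, _ => 0
  | _+1, 0 => 0
  | i+1, j+1 =>
      if a.getD i ' ' == s.getD j ' ' then lcs_rec a s i j + 1
      else max (lcs_rec a s i (j+1)) (lcs_rec a s (i+1) j)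
  termination_by i j => (i, j)

def choose_string_alt (input_string : String) (string_list : List String) : String :=
  let a := input_string.toList
  let scored := string_list.map (fun s =>
    (lcs_rec a s.toList a.length s.toList.length, s))
  match scored with
  | [] => ""
  | x :: xs =>
      -- max(scored, key=fst) keeps the FIRST maximal pair, i.e. replaces only on strict >
      let best := xs.foldl (fun (acc : Int × String) t => if acc.1 < t.1 then t else acc) x
      if best.1 > 0 then best.2 else ""

-- ===== PRECONDITION & SPEC =====
def Spec_choose_string (input_string : String) (string_list : List String) (out : String) : Prop := out = choose_string_alt input_string string_list
instance (input_string : String) (string_list : List String) (out : String) : Decidable (Spec_choose_string input_string string_list out) := by unfold Spec_choose_string; infer_instance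

-- ===== CLAIM (what is proved, stated in full; the proofs are below) =====
def Claim_equal_choose_string : Prop := ∀ (input_string : String) (string_list : List String), Dom_choose_string input_string string_list → Spec_choose_string input_string string_list (choose_string input_string string_list)

-- ===== LEMMAS AND PROOFS =====

-- reference form of one DP row update, written as structural recursion
def refRow (c : Char) : List (Char × Int × Int) → Int → List Int
  | [], _ => []
  | (ch, d, u) :: rest, left =>
      let v := if c == ch then d + 1 else max u left
      v :: refRow c rest v

def stepRow (s2 : List Char) (row : List Int) (c : Char) : List Int :=
  0 :: refRow c (s2.zip (row.zip row.tail)) 0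

theorem refRow_length (c : Char) (ps : List (Char × Int × Int)) (left : Int) :
    (refRow c ps left).length = ps.length := by
  induction ps generalizing left with
  | nil => rfl
  | cons p rest ih => obtain ⟨ch, d, u⟩ := p; simp [refRow, ih]

theorem stepRow_length (s2 : List Char) (row : List Int) (c : Char)
    (h : row.length = s2.length + 1) :
    (stepRow s2 row c).length = s2.length + 1 := by
  simp [stepRow, refRow_length, h]

theorem R_length (s2 : List Char) (pref : List Char) :
    (pref.foldl (stepRow s2) (List.replicate (s2.length + 1) (0 : Int))).length
      = s2.length + 1 := by
  induction pref using List.reverseRecOn with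
  | nil => simp
  | append_singleton xs c ih => rw [List.foldl_append, List.foldl_cons, List.foldl_nil,
      stepRow_length _ _ _ ih]

theorem getD_of_drop {α : Type} [Inhabited α] (l : List α) (k : Nat) (x : α) (t : List α) (d : α)
    (h : l.drop k = x :: t) : l.getD k d = x := by
  have h0 : (l.drop k)[0]? = l[k + 0]? := List.getElem?_drop
  rw [h] at h0
  simp only [List.getElem?_cons_zero, Nat.add_zero] at h0
  simp [List.getD, ← h0]

theorem getD_last {α : Type} (l : List α) (d : α) (h : l ≠ []) :
    l.getD (l.length - 1) d = l.getLastD d := by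
  have hl : 0 < l.length := List.length_pos_iff.mpr h
  rw [List.getD, List.getElem?_eq_getElem (by omega : l.length - 1 < l.length)]
  rw [List.getLastD_eq_getLast?, List.getLast?_eq_getElem?,
    List.getElem?_eq_getElem (by omega : l.length - 1 < l.length)]

theorem set_getD_self {α : Type} (l : List α) (n : Nat) (d : α) (h : n < l.length) :
    l.set n (l.getD n d) = l := by
  rw [List.getD, List.getElem?_eq_getElem h]
  simp

theorem getD_set_self' {α : Type} (l : List α) (n : Nat) (a d : α) (h : n < l.length) :
    (l.set n a).getD n d = a := by
  rw [List.getD, List.getElem?_eq_getElem (by simpa using h)]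
  simp [List.getElem_set_self (by simpa using h)]

theorem getD_set_ne {α : Type} (l : List α) (n r : Nat) (a d : α) (h : n ≠ r) :
    (l.set n a).getD r d = l.getD r d := by
  rw [List.getD, List.getD, List.getElem?_set_ne h]

theorem inner_loop (s1 s2 : List Char) (i : Nat) (hi : 1 ≤ i) (prev : List Int)
    (hprevlen : prev.length = s2.length + 1) :
    ∀ (s2b : List Char) (j : Nat) (pb done : List Int) (mat : List (List Int)),
      i < mat.length →
      mat.getD (i-1) [] = prev →
      s2.drop (j-1) = s2b →
      prev.drop (j-1) = pb →
      1 ≤ j → done.length = j → done ≠ [] →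
      mat.getD i [] = done ++ List.replicate (s2.length + 1 - j) 0 →
      (List.range' j s2b.length).foldl
        (fun mat j =>
          let v : Int :=
            if s1.getD (i-1) ' ' == s2.getD (j-1) ' ' then
              (mat.getD (i-1) []).getD (j-1) 0 + 1
            else
              max ((mat.getD (i-1) []).getD j 0) ((mat.getD i []).getD (j-1) 0)
          mat.set i ((mat.getD i []).set j v)) mat
      = mat.set i (done ++ refRow (s1.getD (i-1) ' ') (s2b.zip (pb.zip pb.tail)) (done.getLastD 0)) := by
  intro s2b
  induction s2b with
  | nil =>
      intro j pb done mat hilen hprev hdrop hpb hj hdlen hdne hrow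
      have hms : s2.length ≤ j - 1 := by
        have := congrArg List.length hdrop
        simp [List.length_drop] at this
        omega
      have hz : s2.length + 1 - j = 0 := by omega
      rw [hz, List.replicate_zero, List.append_nil] at hrow
      simp only [List.length_nil, List.range'_zero, List.foldl_nil, List.zip_nil_left,
        refRow, List.append_nil]
      rw [← hrow, set_getD_self _ _ _ hilen]
  | cons ch rest ih =>
      intro j pb done mat hilen hprev hdrop hpb hj hdlen hdne hrow
      have hjm : j - 1 < s2.length := by
        have := congrArg List.length hdrop
        simp [List.length_drop] at this
        omega
      have hpblen : s2.length + 1 - (j - 1) = pb.length := by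
        have := congrArg List.length hpb
        simpa [List.length_drop, hprevlen] using this
      obtain ⟨d, u, pbrest, rfl⟩ : ∃ d u pbrest, pb = d :: u :: pbrest := by
        cases pb with
        | nil => exfalso; simp at hpblen; omega
        | cons d t =>
            cases t with
            | nil => exfalso; simp at hpblen; omega
            | cons u r => exact ⟨d, u, r, rfl⟩
      have hch : s2.getD (j-1) ' ' = ch := getD_of_drop _ _ _ _ _ hdrop
      have hd : prev.getD (j-1) 0 = d := getD_of_drop _ _ _ _ _ hpb
      have hdropj : s2.drop j = rest := by
        have : s2.drop (j - 1 + 1) = (s2.drop (j-1)).drop 1 := by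
          rw [← List.drop_drop]
        rw [hdrop] at this
        simpa [show j - 1 + 1 = j by omega] using this
      have hpbj : prev.drop j = u :: pbrest := by
        have : prev.drop (j - 1 + 1) = (prev.drop (j-1)).drop 1 := by
          rw [← List.drop_drop]
        rw [hpb] at this
        simpa [show j - 1 + 1 = j by omega] using this
      have hu : prev.getD j 0 = u := getD_of_drop _ _ _ _ _ hpbj
      have hcur : (mat.getD i []).getD (j-1) 0 = done.getLastD 0 := by
        rw [hrow, List.getD_append _ _ _ _ (by omega : j - 1 < done.length)]
        have := getD_last done (0:Int) hdne
        rw [hdlen] at this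
        exact this
      set c := s1.getD (i-1) ' ' with hc
      set v : Int := if c == ch then d + 1 else max u (done.getLastD 0) with hv
      have hrep : s2.length + 1 - j = (s2.length - j) + 1 := by omega
      have hset : (mat.getD i []).set j v = (done ++ [v]) ++ List.replicate (s2.length + 1 - (j+1)) 0 := by
        rw [hrow, List.set_append, if_neg (by omega)]
        rw [hdlen, Nat.sub_self, hrep, List.replicate_succ, List.set_cons_zero]
        simp [show s2.length + 1 - (j+1) = s2.length - j by omega]
      simp only [List.length_cons]
      rw [List.range'_succ, List.foldl_cons]
      rw [hch, hprev, hd, hu, hcur, ← hv, hset]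
      rw [ih (j+1) (u :: pbrest) (done ++ [v]) _
        (by simpa using hilen)
        (by rw [getD_set_ne _ _ _ _ _ (by omega)]; exact hprev)
        (by simpa using hdropj)
        (by simpa using hpbj)
        (by omega)
        (by simp [hdlen])
        (by simp)
        (by rw [getD_set_self' _ _ _ _ hilen])]
      rw [List.set_set]
      congr 1
      simp only [List.zip_cons_cons, List.tail_cons, refRow]
      rw [List.append_assoc]
      have hv' : v = if c = ch then d + 1 else max u (done.getLast?.getD 0) := by
        rw [hv]; simp [List.getLastD_eq_getLast?]
      simp [hv']

theorem outer_loop (s1 s2 : List Char) :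
    ∀ (s1b : List Char) (k : Nat) (mat : List (List Int)),
      s1.drop k = s1b →
      k + s1b.length = s1.length →
      mat.length = s1.length + 1 →
      mat.getD k [] = (s1.take k).foldl (stepRow s2) (List.replicate (s2.length + 1) (0 : Int)) →
      (∀ r, k < r → r ≤ s1.length → mat.getD r [] = List.replicate (s2.length + 1) (0 : Int)) →
      ((List.range' (k+1) s1b.length).foldl (fun mat i =>
        (List.range' 1 s2.length).foldl
          (fun mat j =>
            let v : Int :=
              if s1.getD (i-1) ' ' == s2.getD (j-1) ' ' then
                (mat.getD (i-1) []).getD (j-1) 0 + 1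
              else
                max ((mat.getD (i-1) []).getD j 0) ((mat.getD i []).getD (j-1) 0)
          mat.set i ((mat.getD i []).set j v)) mat) mat).getD s1.length []
      = s1.foldl (stepRow s2) (List.replicate (s2.length + 1) (0 : Int)) := by
  intro s1b
  induction s1b with
  | nil =>
      intro k mat hdrop hlen hmlen hk hz
      simp only [List.length_nil, List.range'_zero, List.foldl_nil]
      have hkn : k = s1.length := by simpa using hlen
      subst hkn
      simpa [List.take_length] using hk
  | cons c rest ih =>
      intro k mat hdrop hlen hmlen hk hz
      simp only [List.length_cons] at hlen
      have hkn : k < s1.length := by omega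
      have hget : s1[k]? = some c := by
        have h0 : (s1.drop k)[0]? = s1[k + 0]? := List.getElem?_drop
        rw [hdrop] at h0
        simpa using h0.symm
      have hc : s1.getD k ' ' = c := getD_of_drop _ _ _ _ _ hdrop
      have hdropk1 : s1.drop (k+1) = rest := by
        have : s1.drop (k + 1) = (s1.drop k).drop 1 := by rw [List.drop_drop]
        rw [hdrop] at this
        simpa using this
      simp only [List.length_cons]
      rw [List.range'_succ, List.foldl_cons]
      have hprevlen := R_length s2 (s1.take k)
      have hinner := inner_loop s1 s2 (k+1) (by omega)
        ((s1.take k).foldl (stepRow s2) (List.replicate (s2.length + 1) (0 : Int))) hprevlen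
        s2 1 ((s1.take k).foldl (stepRow s2) (List.replicate (s2.length + 1) (0 : Int)))
        [0] mat (by omega)
        (by simpa using hk)
        (by simp) (by simp) (by omega) (by simp) (by simp)
        (by rw [hz (k+1) (by omega) (by omega)]; simp [List.replicate_succ])
      rw [hinner]
      have hrow : ([(0:Int)] ++ refRow (s1.getD (k+1-1) ' ')
          (s2.zip (((s1.take k).foldl (stepRow s2) (List.replicate (s2.length + 1) (0 : Int))).zip
            ((s1.take k).foldl (stepRow s2) (List.replicate (s2.length + 1) (0 : Int))).tail))
          ([(0:Int)].getLastD 0))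
          = stepRow s2 ((s1.take k).foldl (stepRow s2) (List.replicate (s2.length + 1) (0 : Int))) c := by
        simp [stepRow, List.getD, hget]
      rw [hrow]
      exact ih (k+1) _ hdropk1 (by omega) (by simpa using hmlen)
        (by
          rw [getD_set_self' _ _ _ _ (by omega : k+1 < mat.length)]
          rw [List.take_add_one, hget]
          simp [List.foldl_append])
        (fun r hr1 hr2 => by
          rw [getD_set_ne _ _ _ _ _ (by omega)]
          exact hz r (by omega) hr2)

-- ===== link the DP row fold to B's recursion =====

def rowF (a s : List Char) (i : Nat) : List Int :=
  (List.range (s.length + 1)).map (lcs_rec a s i)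

theorem lcs_rec_zero (a s : List Char) (j : Nat) : lcs_rec a s 0 j = 0 := by
  simp [lcs_rec]

theorem lcs_rec_zero' (a s : List Char) (i : Nat) : lcs_rec a s i 0 = 0 := by
  cases i <;> simp [lcs_rec]

theorem refRow_spec (a s : List Char) (i : Nat) :
    ∀ (t : List Char) (j : Nat), s.drop j = t →
      refRow (a.getD i ' ')
        (t.zip ((List.map (lcs_rec a s i) (List.range' j (t.length + 1))).zip
                (List.map (lcs_rec a s i) (List.range' (j+1) t.length))))
        (lcs_rec a s (i+1) j)
      = List.map (lcs_rec a s (i+1)) (List.range' (j+1) t.length) := by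
  intro t
  induction t with
  | nil => intro j h; simp [refRow]
  | cons ch t' ih =>
      intro j h
      have hch : s.getD j ' ' = ch := getD_of_drop _ _ _ _ _ h
      have hdrop' : s.drop (j+1) = t' := by
        have : s.drop (j + 1) = (s.drop j).drop 1 := by rw [List.drop_drop]
        rw [h] at this
        simpa using this
      simp only [List.length_cons]
      rw [List.range'_succ, List.range'_succ]
      simp only [List.map_cons, List.zip_cons_cons, refRow]
      have hv : (if a.getD i ' ' == ch then lcs_rec a s i j + 1
          else max (lcs_rec a s i (j+1)) (lcs_rec a s (i+1) j))
          = lcs_rec a s (i+1) (j+1) := by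
        rw [lcs_rec, hch]
      rw [hv]
      congr 1
      exact ih (j+1) hdrop'

theorem stepRow_rowF (a s : List Char) (i : Nat) :
    stepRow s (rowF a s i) (a.getD i ' ') = rowF a s (i+1) := by
  unfold stepRow rowF
  have hrange : List.range (s.length + 1) = 0 :: List.range' 1 s.length := by
    rw [List.range_eq_range', List.range'_succ]
  have hmain := refRow_spec a s i s 0 (by simp)
  simp only [List.range'_succ, List.map_cons, lcs_rec_zero', Nat.zero_add] at hmain
  rw [hrange]
  simp only [List.map_cons, List.tail_cons, lcs_rec_zero']
  rw [hmain]

theorem foldl_stepRow_rowF (a s : List Char) :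
    ∀ (u : List Char) (i : Nat), a.drop i = u → i + u.length = a.length →
      u.foldl (stepRow s) (rowF a s i) = rowF a s a.length := by
  intro u
  induction u with
  | nil =>
      intro i _ hlen
      simp only [List.foldl_nil]
      have : i = a.length := by simpa using hlen
      rw [this]
  | cons c u' ih =>
      intro i hdrop hlen
      have hc : a.getD i ' ' = c := getD_of_drop _ _ _ _ _ hdrop
      have hdrop' : a.drop (i+1) = u' := by
        have : a.drop (i + 1) = (a.drop i).drop 1 := by rw [List.drop_drop]
        rw [hdrop] at this
        simpa using this
      simp only [List.foldl_cons]
      rw [← hc, stepRow_rowF]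
      exact ih (i+1) hdrop' (by simp at hlen ⊢; omega)

theorem rowF_zero (a s : List Char) :
    rowF a s 0 = List.replicate (s.length + 1) (0 : Int) := by
  unfold rowF
  apply List.ext_getElem
  · simp
  · intro n h1 h2
    simp [lcs_rec_zero]

theorem rowF_getD_last (a s : List Char) (i : Nat) :
    (rowF a s i).getD s.length 0 = lcs_rec a s i s.length := by
  unfold rowF
  rw [List.getD, List.getElem?_eq_getElem (by simp)]
  simp

theorem lcs_eq (str1 str2 : String) :
    longest_common_substring str1 str2
      = lcs_rec str1.toList str2.toList str1.toList.length str2.toList.length := by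
  unfold longest_common_substring
  simp only []
  have houter := outer_loop str1.toList str2.toList str1.toList 0
    (List.replicate (str1.toList.length + 1) (List.replicate (str2.toList.length + 1) (0 : Int)))
    (by simp) (by simp) (by simp)
    (by simp)
    (fun r hr1 hr2 => by
      have hr2' : r ≤ str1.length := by simpa using hr2
      rw [List.getD]
      rw [List.getElem?_eq_getElem (by simp; omega)]
      simp)
  rw [show (1:Nat) = 0 + 1 by rfl] at houter
  rw [houter]
  rw [← rowF_zero str1.toList str2.toList]
  rw [foldl_stepRow_rowF str1.toList str2.toList str1.toList 0 (by simp) (by simp)]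
  exact rowF_getD_last _ _ _

-- ===== the outer max-scan =====

theorem lcs_rec_nonneg (a s : List Char) : ∀ i j, 0 ≤ lcs_rec a s i j := by
  intro i
  induction i with
  | zero => intro j; simp [lcs_rec_zero]
  | succ i ih =>
      intro j
      induction j with
      | zero => simp [lcs_rec_zero']
      | succ j _ =>
          rw [lcs_rec]
          split
          · have := ih j; omega
          · exact le_max_of_le_left (ih (j+1))

theorem pick_fst_le (L : String → Int) (l : List String) (acc : Int × String) :
    acc.1 ≤ (l.foldl (fun (acc : Int × String) s =>
      if acc.1 < L s then (L s, s) else acc) acc).1 := by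
  induction l generalizing acc with
  | nil => simp
  | cons s t ih =>
      simp only [List.foldl_cons]
      refine le_trans ?_ (ih _)
      split
      · simp; omega
      · simp

theorem pick_zero (L : String → Int) (l : List String) :
    ∀ (sA sB : String),
      ((l.foldl (fun (acc : Int × String) s =>
          if acc.1 < L s then (L s, s) else acc) (0, sA)).1
        = (l.foldl (fun (acc : Int × String) s =>
          if acc.1 < L s then (L s, s) else acc) (0, sB)).1)
      ∧ (0 < (l.foldl (fun (acc : Int × String) s =>
          if acc.1 < L s then (L s, s) else acc) (0, sA)).1 →
          (l.foldl (fun (acc : Int × String) s =>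
            if acc.1 < L s then (L s, s) else acc) (0, sA))
          = (l.foldl (fun (acc : Int × String) s =>
            if acc.1 < L s then (L s, s) else acc) (0, sB)))
      ∧ ((l.foldl (fun (acc : Int × String) s =>
          if acc.1 < L s then (L s, s) else acc) (0, sA)).1 = 0 →
          (l.foldl (fun (acc : Int × String) s =>
            if acc.1 < L s then (L s, s) else acc) (0, sA)).2 = sA
          ∧ (l.foldl (fun (acc : Int × String) s =>
            if acc.1 < L s then (L s, s) else acc) (0, sB)).2 = sB) := by
  induction l with
  | nil => intro sA sB; simp
  | cons x t ih =>
      intro sA sB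
      simp only [List.foldl_cons]
      by_cases hx : (0 : Int) < L x
      · simp only [if_pos hx]
        refine ⟨trivial, fun _ => trivial, fun h0 => absurd h0 ?_⟩
        have := pick_fst_le L t ((L x, x) : Int × String)
        simp only at this
        omega
      · simp only [if_neg hx]
        exact ih sA sB

theorem pick_main (L : String → Int) (hL : ∀ s, 0 ≤ L s) (x : String) (xs : List String) :
    (xs.foldl (fun (acc : Int × String) s => if acc.1 < L s then (L s, s) else acc)
        (if (0:Int) < L x then (L x, x) else ((0:Int), ""))).2
      = if (xs.foldl (fun (acc : Int × String) s =>
            if acc.1 < L s then (L s, s) else acc) (L x, x)).1 > 0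
          then (xs.foldl (fun (acc : Int × String) s =>
            if acc.1 < L s then (L s, s) else acc) (L x, x)).2
          else "" := by
  by_cases hx : (0 : Int) < L x
  · rw [if_pos hx]
    have hpos : L x ≤ (xs.foldl (fun (acc : Int × String) s =>
        if acc.1 < L s then (L s, s) else acc) (L x, x)).1 := pick_fst_le L xs (L x, x)
    rw [if_pos (by omega)]
  · rw [if_neg hx]
    have hx0 : L x = 0 := le_antisymm (not_lt.mp hx) (hL x)
    rw [hx0]
    obtain ⟨h1, h2, h3⟩ := pick_zero L xs "" x
    have hge : (0 : Int) ≤ (xs.foldl (fun (acc : Int × String) s =>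
        if acc.1 < L s then (L s, s) else acc) ((0 : Int), "")).1 := pick_fst_le L xs (0, "")
    rcases hge.lt_or_eq with hgt | heq
    · rw [h2 hgt, if_pos (by rw [← h1]; exact hgt)]
    · rw [if_neg (by rw [← h1, ← heq]; omega)]
      exact (h3 heq.symm).1

theorem choose_eq (input_string : String) (string_list : List String) :
    choose_string input_string string_list = choose_string_alt input_string string_list := by
  unfold choose_string choose_string_alt
  simp only [lcs_eq]
  cases string_list with
  | nil => simp
  | cons x xs =>
      simp only [List.map_cons, List.foldl_cons, List.foldl_map]
      exact pick_main
        (fun s => lcs_rec input_string.toList s.toList input_string.toList.length s.toList.length)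
        (fun s => lcs_rec_nonneg _ _ _ _) x xs

-- ===== VERDICT (by name: the statement is the Claim_ definition above) =====
theorem choose_string_spec : Claim_equal_choose_string := by
  intro input_string string_list _
  exact choose_eq input_string string_list
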